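-- pv_equiv track=rewrite | github.com/lunarknight00/algorithm_challenges | hacker_rank/RetrunPow2GivenRange.py | solve
-- ===== SOURCE A (Python) =====
-- def isPowerOfTwo(n):
--     if not n:
--         return False
--     return n and not (n&(n-1))
--
-- def solve(start,end):
--     """
--     >>> solve(-8,9)
--     [-8, -4, -2, -1, 1, 2, 4, 8]
--
--     >>> solve(0,9)
--     [1, 2, 4, 8]
--     """
--     result = list()
--     if start < 0:
--         result = [i for i in range(start,0) if isPowerOfTwo(-i)]
--         if end >= 0:
--             result += [i for i in range(0,end) if isPowerOfTwo(i)]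
--     else:
--         result = [i for i in range(start,end) if isPowerOfTwo(i)]
--     return result
-- ===== SOURCE B (Python) =====
-- def solve(start, end):
--     neg, pos = [], []
--     p = 1
--     while -p >= start or p < end:
--         if start <= -p < end:
--             neg.append(-p)
--         if start <= p < end:
--             pos.append(p)
--         p *= 2
--     neg.reverse()
--     return neg + pos
-- ===== Notes on version B (the rewrite author's own statement) =====
-- stated objective: alternative
-- what changed: A filters every integer of range(start,end) through the n&(n-1) bit test; B instead doubles a single cursor p through the powers of two and collects those inside [start,end), doing one loop step per power of two rather than one per integer (intended as faster — O(log bounds) vs O(end-start) — but a timing run's measurements were inconsistent across inputs, so no speed is claimed).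
-- intended difference: When start < 0 and end < 0, A's range(start, 0) ignores end and returns every negative power of two up to -1 (e.g. solve(-4,-2) = [-4,-2,-1]); B returns the powers of two actually inside [start, end) ([-4]), which is the intended value. — e.g. on solve(-4, -2): A returns [-4, -2, -1], B returns [-4]
import Mathlib
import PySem

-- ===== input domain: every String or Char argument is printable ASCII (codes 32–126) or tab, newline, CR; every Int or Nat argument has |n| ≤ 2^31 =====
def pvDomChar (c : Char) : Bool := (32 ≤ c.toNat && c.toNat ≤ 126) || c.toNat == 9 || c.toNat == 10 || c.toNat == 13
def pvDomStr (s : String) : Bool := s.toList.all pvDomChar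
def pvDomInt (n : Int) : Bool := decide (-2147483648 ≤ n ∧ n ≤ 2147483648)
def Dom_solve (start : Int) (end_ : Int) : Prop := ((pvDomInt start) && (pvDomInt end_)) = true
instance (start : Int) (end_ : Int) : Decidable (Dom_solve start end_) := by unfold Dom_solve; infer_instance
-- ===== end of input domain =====

-- B replaces A's per-integer scan of the range by directly doubling a cursor through the
-- powers of two (one loop step per power instead of per integer); on start<0 ∧ end<0
-- (D_solve) B also honours `end`, which A ignores there.

-- ===== PORT A =====
def isPowerOfTwo (n : Int) : Bool :=
  if n == 0 then false
  else PySem.Int.band n (n - 1) == 0   -- `n and not (n&(n-1))`: n ≠ 0 here, so the value is `not (n&(n-1))`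

def solve (start : Int) (end_ : Int) : List Int :=
  if start < 0 then
    let result := (PySem.List.pyRange start 0 1).filter (fun i => isPowerOfTwo (-i))
    if 0 ≤ end_ then
      result ++ (PySem.List.pyRange 0 end_ 1).filter (fun i => isPowerOfTwo i)
    else result
  else
    (PySem.List.pyRange start end_ 1).filter (fun i => isPowerOfTwo i)

-- ===== PORT B =====
-- the `while` loop of Source B: p doubles, so the measure max(1-start,end)-p decreases
def solveLoop (start : Int) (end_ : Int) (p : Int) (neg pos : List Int) (hp : 1 ≤ p) :
    List Int × List Int :=
  if h : start ≤ -p ∨ p < end_ then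
    solveLoop start end_ (2 * p)
      (if start ≤ -p ∧ -p < end_ then neg ++ [-p] else neg)
      (if start ≤ p ∧ p < end_ then pos ++ [p] else pos)
      (by omega)
  else (neg, pos)
termination_by (max (1 - start) end_ - p).toNat
decreasing_by omega

def solve_alt (start : Int) (end_ : Int) : List Int :=
  let r := solveLoop start end_ 1 [] [] (by omega)
  r.1.reverse ++ r.2

-- ===== PRECONDITION & SPEC =====
-- When start < 0 and end < 0, A returns every negative power of two down to start
-- (range(start, 0) ignores end), e.g. solve(-8,-2) = [-8,-4,-2,-1]; B returns the powers
-- of two actually inside [start, end), here [-8,-4], which is the intended value.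
def D_solve (start : Int) (end_ : Int) : Prop := start < 0 ∧ end_ < 0
instance (start : Int) (end_ : Int) : Decidable (D_solve start end_) := by unfold D_solve; infer_instance

def Spec_solve (start : Int) (end_ : Int) (out : List Int) : Prop :=
  ¬ D_solve start end_ → out = solve_alt start end_
instance (start : Int) (end_ : Int) (out : List Int) : Decidable (Spec_solve start end_ out) := by
  unfold Spec_solve; infer_instance

def pvDiffWitness_solve : Int × Int := (-4, -2)
def pvDiffWitnessOut_solve : (List Int) × (List Int) := ([-4, -2, -1], [-4])

-- ===== CLAIM (what is proved, stated in full; the proofs are below) =====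
def Claim_unchanged_solve : Prop :=
  ∀ (start : Int) (end_ : Int), Dom_solve start end_ → Spec_solve start end_ (solve start end_)
def Claim_changed_solve : Prop :=
  Dom_solve (pvDiffWitness_solve.1) (pvDiffWitness_solve.2) ∧
  D_solve (pvDiffWitness_solve.1) (pvDiffWitness_solve.2) ∧
  solve (pvDiffWitness_solve.1) (pvDiffWitness_solve.2) = pvDiffWitnessOut_solve.1 ∧
  solve_alt (pvDiffWitness_solve.1) (pvDiffWitness_solve.2) = pvDiffWitnessOut_solve.2 ∧
  pvDiffWitnessOut_solve.1 ≠ pvDiffWitnessOut_solve.2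
def Claim_exact_solve : Prop :=
  ∀ (start : Int) (end_ : Int), Dom_solve start end_ → D_solve start end_ →
    solve start end_ ≠ solve_alt start end_

-- ===== LEMMAS AND PROOFS =====

-- bit trick: for n ≥ 1, n &&& (n-1) = 0 exactly on powers of two
theorem nat_land_pred_eq_zero_iff (n : Nat) (hn : 1 ≤ n) :
    n &&& (n - 1) = 0 ↔ ∃ k : Nat, n = 2 ^ k := by
  constructor
  · intro h
    induction n using Nat.strong_induction_on with
    | _ n ih =>
      rcases Nat.even_or_odd n with he | ho
      · -- n = 2*m, m ≥ 1
        obtain ⟨m, hm⟩ := he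
        have hm1 : 1 ≤ m := by omega
        have hb : n = Nat.bit false m := by simp [Nat.bit_val]; omega
        have hb' : n - 1 = Nat.bit true (m - 1) := by simp [Nat.bit_val]; omega
        have : n &&& (n - 1) = Nat.bit false (m &&& (m - 1)) := by
          rw [hb', hb, Nat.land_bit]; rfl
        rw [this, Nat.bit_val] at h
        have hz : m &&& (m - 1) = 0 := by omega
        obtain ⟨k, hk⟩ := ih m (by omega) hm1 hz
        exact ⟨k + 1, by rw [pow_succ]; omega⟩
      · -- n odd
        obtain ⟨m, hm⟩ := ho
        rcases Nat.eq_zero_or_pos m with h0 | hmp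
        · exact ⟨0, by omega⟩
        · exfalso
          have hb : n = Nat.bit true m := by simp [Nat.bit_val]; omega
          have hb' : n - 1 = Nat.bit false m := by simp [Nat.bit_val]; omega
          have : n &&& (n - 1) = Nat.bit false (m &&& m) := by
            rw [hb', hb, Nat.land_bit]; rfl
          have hss : m &&& m = m := by simp
          rw [this, Nat.bit_val, hss] at h
          omega
  · rintro ⟨k, rfl⟩
    rw [Nat.two_pow_and, Nat.testBit_two_pow_sub_one]
    simp
theorem isPowerOfTwo_iff (x : Int) (hx : 0 ≤ x) :
    isPowerOfTwo x = true ↔ ∃ k : Nat, x = 2 ^ k := by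
  rcases eq_or_lt_of_le hx with h0 | h1
  · simp only [isPowerOfTwo, ← h0]
    constructor
    · intro h; simp at h
    · rintro ⟨k, hk⟩
      exfalso; have : (0:Int) < 2 ^ k := by positivity
      omega
  · have hx1 : 1 ≤ x := h1
    obtain ⟨n, rfl⟩ := Int.eq_ofNat_of_zero_le hx
    have hn : 1 ≤ n := by exact_mod_cast hx1
    have hne : ((n : Int) == 0) = false := by simp only [beq_eq_false_iff_ne, ne_eq]; omega
    have hcast : ((n : Int) - 1) = ((n - 1 : Nat) : Int) := by omega
    simp only [isPowerOfTwo, hne, Bool.false_eq_true, if_false, hcast,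
      PySem.Int.band_natCast, beq_iff_eq]
    rw [show ((((n &&& (n-1)) : Nat) : Int) = 0 ↔ n &&& (n - 1) = 0) from by omega]
    rw [nat_land_pred_eq_zero_iff n hn]
    constructor
    · rintro ⟨k, rfl⟩; exact ⟨k, by push_cast; ring⟩
    · rintro ⟨k, hk⟩; refine ⟨k, ?_⟩
      have : ((2:Int) ^ k) = ((2 ^ k : Nat) : Int) := by push_cast; ring
      rw [this] at hk; exact_mod_cast hk
theorem solveLoop_mem (s e : Int) (p : Int) (hp : 1 ≤ p) (neg pos : List Int) :
    (∀ x, x ∈ (solveLoop s e p neg pos hp).1 ↔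
      x ∈ neg ∨ ∃ k : Nat, x = -(p * 2 ^ k) ∧ s ≤ x ∧ x < e) ∧
    (∀ x, x ∈ (solveLoop s e p neg pos hp).2 ↔
      x ∈ pos ∨ ∃ k : Nat, x = p * 2 ^ k ∧ s ≤ x ∧ x < e) := by
  induction p, neg, pos, hp using solveLoop.induct s e with
  | case1 p neg pos hp h ih =>
    rw [solveLoop, dif_pos h]
    obtain ⟨ih1, ih2⟩ := ih
    simp only [dite_eq_ite] at ih1 ih2
    constructor
    · intro x
      rw [ih1 x]
      constructor
      · rintro (hx | ⟨k, hk, hs, he⟩)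
        · split at hx
          · rcases List.mem_append.1 hx with h' | h'
            · exact Or.inl h'
            · simp at h'
              refine Or.inr ⟨0, by simpa using h', ?_, ?_⟩ <;> omega
          · exact Or.inl hx
        · exact Or.inr ⟨k + 1, by rw [hk]; ring_nf, hs, he⟩
      · rintro (hx | ⟨k, hk, hs, he⟩)
        · left; split
          · exact List.mem_append.2 (Or.inl hx)
          · exact hx
        · cases k with
          | zero =>
            left
            have hx' : x = -p := by omega
            rw [if_pos (by constructor <;> omega)]
            simp [hx']
          | succ k =>
            right
            exact ⟨k, by rw [hk]; ring_nf, hs, he⟩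
    · intro x
      rw [ih2 x]
      constructor
      · rintro (hx | ⟨k, hk, hs, he⟩)
        · split at hx
          · rcases List.mem_append.1 hx with h' | h'
            · exact Or.inl h'
            · simp at h'
              refine Or.inr ⟨0, by simpa using h', ?_, ?_⟩ <;> omega
          · exact Or.inl hx
        · exact Or.inr ⟨k + 1, by rw [hk]; ring_nf, hs, he⟩
      · rintro (hx | ⟨k, hk, hs, he⟩)
        · left; split
          · exact List.mem_append.2 (Or.inl hx)
          · exact hx
        · cases k with
          | zero =>
            left
            have hx' : x = p := by omega
            rw [if_pos (by constructor <;> omega)]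
            simp [hx']
          | succ k =>
            right
            exact ⟨k, by rw [hk]; ring_nf, hs, he⟩
  | case2 p neg pos hp h =>
    rw [solveLoop, dif_neg h]
    have hpk : ∀ k : Nat, p ≤ p * 2 ^ k := fun k =>
      le_mul_of_one_le_right (by omega) (one_le_pow₀ (by omega))
    constructor
    · intro x
      simp only [iff_self_or]
      rintro ⟨k, hk, hs, he⟩
      have := hpk k
      omega
    · intro x
      simp only [iff_self_or]
      rintro ⟨k, hk, hs, he⟩
      have := hpk k
      omega
theorem solveLoop_sorted (s e : Int) (p : Int) (hp : 1 ≤ p) (neg pos : List Int)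
    (h1 : neg.Pairwise (· > ·)) (h2 : pos.Pairwise (· < ·))
    (h3 : ∀ y ∈ neg, -p < y) (h4 : ∀ y ∈ pos, y < p) :
    (solveLoop s e p neg pos hp).1.Pairwise (· > ·) ∧
    (solveLoop s e p neg pos hp).2.Pairwise (· < ·) := by
  induction p, neg, pos, hp using solveLoop.induct s e with
  | case1 p neg pos hp h ih =>
    rw [solveLoop, dif_pos h]
    simp only [dite_eq_ite] at ih
    apply ih
    · split_ifs with hc
      · exact List.pairwise_append.2 ⟨h1, List.pairwise_singleton _ _, by
          intro a ha b hb; simp at hb; subst hb; exact h3 a ha⟩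
      · exact h1
    · split_ifs with hc
      · exact List.pairwise_append.2 ⟨h2, List.pairwise_singleton _ _, by
          intro a ha b hb; simp at hb; subst hb; exact h4 a ha⟩
      · exact h2
    · intro y hy; split_ifs at hy with hc
      · rcases List.mem_append.1 hy with h' | h'
        · have := h3 y h'; omega
        · simp at h'; omega
      · have := h3 y hy; omega
    · intro y hy; split_ifs at hy with hc
      · rcases List.mem_append.1 hy with h' | h'
        · have := h4 y h'; omega
        · simp at h'; omega
      · have := h4 y hy; omega
  | case2 p neg pos hp h =>
    rw [solveLoop, dif_neg h]
    exact ⟨h1, h2⟩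
theorem mem_solve_alt (s e x : Int) :
    x ∈ solve_alt s e ↔ (∃ k : Nat, x = 2 ^ k ∨ x = -(2 ^ k)) ∧ s ≤ x ∧ x < e := by
  obtain ⟨m1, m2⟩ := solveLoop_mem s e 1 (by omega) [] []
  simp only [solve_alt, List.mem_append, List.mem_reverse, m1 x, m2 x,
    List.not_mem_nil, false_or, one_mul]
  constructor
  · rintro (⟨k, hk, hs, he⟩ | ⟨k, hk, hs, he⟩)
    · exact ⟨⟨k, Or.inr hk⟩, hs, he⟩
    · exact ⟨⟨k, Or.inl hk⟩, hs, he⟩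
  · rintro ⟨⟨k, hk | hk⟩, hs, he⟩
    · exact Or.inr ⟨k, hk, hs, he⟩
    · exact Or.inl ⟨k, hk, hs, he⟩

theorem sorted_solve_alt (s e : Int) : (solve_alt s e).Pairwise (· < ·) := by
  obtain ⟨w1, w2⟩ := solveLoop_sorted s e 1 (by omega) [] []
    List.Pairwise.nil List.Pairwise.nil (by simp) (by simp)
  obtain ⟨m1, m2⟩ := solveLoop_mem s e 1 (by omega) [] []
  unfold solve_alt
  refine List.pairwise_append.2 ⟨List.pairwise_reverse.2 w1, w2, ?_⟩
  intro a ha b hb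
  rw [List.mem_reverse] at ha
  obtain ⟨k, hk, -, -⟩ := ((m1 a).1 ha).resolve_left (List.not_mem_nil)
  obtain ⟨j, hj, -, -⟩ := ((m2 b).1 hb).resolve_left (List.not_mem_nil)
  have h1 : (1:Int) ≤ 2 ^ k := one_le_pow₀ (by norm_num)
  have h2 : (1:Int) ≤ 2 ^ j := one_le_pow₀ (by norm_num)
  omega

theorem mem_solve (s e x : Int) (hD : ¬ D_solve s e) :
    x ∈ solve s e ↔ (∃ k : Nat, x = 2 ^ k ∨ x = -(2 ^ k)) ∧ s ≤ x ∧ x < e := by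
  unfold solve
  by_cases hs : s < 0
  · have he : 0 ≤ e := by unfold D_solve at hD; omega
    rw [if_pos hs, if_pos he]
    simp only [List.mem_append, List.mem_filter, PySem.List.mem_pyRange_one]
    constructor
    · rintro (⟨⟨hsx, hx0⟩, hpow⟩ | ⟨⟨hx0, hxe⟩, hpow⟩)
      · obtain ⟨k, hk⟩ := (isPowerOfTwo_iff (-x) (by omega)).1 hpow
        exact ⟨⟨k, Or.inr (by omega)⟩, hsx, by omega⟩
      · obtain ⟨k, hk⟩ := (isPowerOfTwo_iff x (by omega)).1 hpow
        have h1 : (1:Int) ≤ 2 ^ k := one_le_pow₀ (by norm_num)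
        exact ⟨⟨k, Or.inl hk⟩, by omega, hxe⟩
    · rintro ⟨⟨k, hk | hk⟩, hsx, hxe⟩
      · have h1 : (1:Int) ≤ 2 ^ k := one_le_pow₀ (by norm_num)
        exact Or.inr ⟨⟨by omega, hxe⟩, (isPowerOfTwo_iff x (by omega)).2 ⟨k, hk⟩⟩
      · have h1 : (1:Int) ≤ 2 ^ k := one_le_pow₀ (by norm_num)
        exact Or.inl ⟨⟨hsx, by omega⟩, (isPowerOfTwo_iff (-x) (by omega)).2 ⟨k, by omega⟩⟩
  · rw [if_neg hs]
    simp only [List.mem_filter, PySem.List.mem_pyRange_one]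
    constructor
    · rintro ⟨⟨hsx, hxe⟩, hpow⟩
      obtain ⟨k, hk⟩ := (isPowerOfTwo_iff x (by omega)).1 hpow
      exact ⟨⟨k, Or.inl hk⟩, hsx, hxe⟩
    · rintro ⟨⟨k, hk | hk⟩, hsx, hxe⟩
      · exact ⟨⟨hsx, hxe⟩, (isPowerOfTwo_iff x (by omega)).2 ⟨k, hk⟩⟩
      · have h1 : (1:Int) ≤ 2 ^ k := one_le_pow₀ (by norm_num)
        omega

theorem sorted_solve (s e : Int) (hD : ¬ D_solve s e) : (solve s e).Pairwise (· < ·) := by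
  unfold solve
  by_cases hs : s < 0
  · have he : 0 ≤ e := by unfold D_solve at hD; omega
    rw [if_pos hs, if_pos he]
    refine List.pairwise_append.2
      ⟨List.Pairwise.filter _ (PySem.List.pairwise_lt_pyRange_one _ _),
       List.Pairwise.filter _ (PySem.List.pairwise_lt_pyRange_one _ _), ?_⟩
    intro a ha b hb
    have ha' := (List.mem_filter.1 ha).1
    have hb' := (List.mem_filter.1 hb).1
    rw [PySem.List.mem_pyRange_one] at ha' hb'
    omega
  · rw [if_neg hs]
    exact List.Pairwise.filter _ (PySem.List.pairwise_lt_pyRange_one _ _)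

theorem list_eq_of_pairwise_lt (l₁ l₂ : List Int)
    (h₁ : l₁.Pairwise (· < ·)) (h₂ : l₂.Pairwise (· < ·))
    (hm : ∀ x, x ∈ l₁ ↔ x ∈ l₂) : l₁ = l₂ := by
  exact List.Pairwise.eq_of_mem_iff h₁ h₂ hm

-- ===== VERDICT (by name: the statement is the Claim_ definition above) =====
theorem solve_spec : Claim_unchanged_solve := by
  intro s e _ hD
  exact list_eq_of_pairwise_lt _ _ (sorted_solve s e hD) (sorted_solve_alt s e)
    (fun x => (mem_solve s e x hD).trans (mem_solve_alt s e x).symm)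

theorem solve_changed : Claim_changed_solve := by
  unfold Claim_changed_solve
  refine ⟨by decide, by decide, by decide, ?_, by decide⟩
  show solve_alt (-4) (-2) = [-4]
  rw [solve_alt]
  rw [solveLoop]; norm_num
  rw [solveLoop]; norm_num
  rw [solveLoop]; norm_num
  rw [solveLoop]; norm_num

theorem solve_tight : Claim_exact_solve := by
  intro s e _ hd heq
  obtain ⟨hs, he⟩ := hd
  have h1 : (-1 : Int) ∈ solve s e := by
    unfold solve
    rw [if_pos hs, if_neg (by omega)]
    refine List.mem_filter.2 ⟨PySem.List.mem_pyRange_one.2 ⟨by omega, by omega⟩, ?_⟩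
    decide
  rw [heq, mem_solve_alt] at h1
  omega
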